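-- pv_equiv track=rewrite | github.com/aitrail001/words-v2 | scripts/seed_review_scenarios.py | choose_primary_phonetic
-- ===== SOURCE A (Python) =====
-- def choose_primary_phonetic(phonetics: dict | None) -> str | None:
--     if not phonetics:
--         return None
--     for locale in ("us", "uk", "au"):
--         candidate = phonetics.get(locale, {}).get("ipa")
--         if candidate:
--             return candidate
--     for value in phonetics.values():
--         candidate = value.get("ipa")
--         if candidate:
--             return candidate
--     return None
-- ===== SOURCE B (Python) =====
-- def choose_primary_phonetic(phonetics: dict | None) -> str | None:
--     if not phonetics:
--         return None
--     rank = {"us": 0, "uk": 1, "au": 2}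
--     slots = [None, None, None, None]
--     for locale, value in phonetics.items():
--         ipa = value.get("ipa")
--         if ipa:
--             r = rank.get(locale, 3)
--             if slots[r] is None:
--                 slots[r] = ipa
--     for s in slots:
--         if s:
--             return s
--     return None
-- ===== Notes on version B (the rewrite author's own statement) =====
-- stated objective: alternative
-- what changed: A's staged strategy (probe three preferred locales via dict lookups, then a second fallback scan over all values) is replaced by a single pass over the items that fills a first-wins 4-slot bucket array indexed by locale rank (us=0, uk=1, au=2, other=3), returning the first filled bucket.
import Mathlib
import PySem

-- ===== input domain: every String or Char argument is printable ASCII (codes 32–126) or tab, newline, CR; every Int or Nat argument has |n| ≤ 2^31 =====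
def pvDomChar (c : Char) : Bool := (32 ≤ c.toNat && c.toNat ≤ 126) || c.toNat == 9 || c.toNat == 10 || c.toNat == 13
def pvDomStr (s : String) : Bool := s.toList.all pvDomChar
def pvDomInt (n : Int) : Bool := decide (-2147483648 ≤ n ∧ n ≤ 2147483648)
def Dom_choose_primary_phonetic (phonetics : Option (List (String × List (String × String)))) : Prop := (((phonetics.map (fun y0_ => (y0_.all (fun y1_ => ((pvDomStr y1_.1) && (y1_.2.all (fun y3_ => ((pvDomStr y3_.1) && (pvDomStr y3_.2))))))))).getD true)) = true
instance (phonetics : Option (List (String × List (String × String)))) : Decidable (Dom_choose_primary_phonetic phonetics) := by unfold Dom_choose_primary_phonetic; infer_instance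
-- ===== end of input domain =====

-- B replaces A's staged probing (three dict lookups, then a second fallback scan over
-- all values) by ONE pass over the items filling a 4-slot first-wins bucket array
-- indexed by locale rank, then picking the first filled bucket; objective: alternative.

-- Python truthiness filter on an Optional[str]: '' and None are falsy.
def pvTruthy (o : Option String) : Option String :=
  match o with
  | some s => if s = "" then none else some s
  | none => none

-- ===== PORT A =====
-- phonetics.get(locale, {}).get("ipa")
def pvIpaAt (d : List (String × List (String × String))) (loc : String) : Option String :=
  (PySem.Dict.mk ((PySem.Dict.mk d).getD loc [])).get? "ipa"

-- first loop: for locale in ("us","uk","au"): candidate = phonetics.get(locale, {}).get("ipa"); if candidate: return candidate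
def pvPrefScan (d : List (String × List (String × String))) : List String → Option String
  | [] => none
  | loc :: rest =>
    match pvTruthy (pvIpaAt d loc) with
    | some c => some c
    | none => pvPrefScan d rest

-- second loop: for value in phonetics.values(): candidate = value.get("ipa"); if candidate: return candidate
def pvValScan : List (String × List (String × String)) → Option String
  | [] => none
  | (_, v) :: rest =>
    match pvTruthy ((PySem.Dict.mk v).get? "ipa") with
    | some c => some c
    | none => pvValScan rest

def choose_primary_phonetic (phonetics : Option (List (String × List (String × String)))) : Option String :=
  match phonetics with
  | none => none
  | some d =>
    if d = [] then none
    else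
      match pvPrefScan d ["us", "uk", "au"] with
      | some c => some c
      | none => pvValScan d

-- ===== PORT B =====
-- rank = {"us": 0, "uk": 1, "au": 2};  r = rank.get(locale, 3)
def pvRank (k : String) : Nat :=
  (PySem.Dict.mk [("us", 0), ("uk", 1), ("au", 2)]).getD k 3

-- loop body: ipa = value.get("ipa"); if ipa: r = rank.get(locale, 3); if slots[r] is None: slots[r] = ipa
def pvSlotStep (slots : List (Option String)) (kv : String × List (String × String)) :
    List (Option String) :=
  match pvTruthy ((PySem.Dict.mk kv.2).get? "ipa") with
  | none => slots
  | some ipa =>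
    let r := pvRank kv.1
    if (slots.getD r none).isNone then slots.set r (some ipa) else slots

def choose_primary_phonetic_alt (phonetics : Option (List (String × List (String × String)))) : Option String :=
  match phonetics with
  | none => none
  | some d =>
    if d = [] then none
    else (d.foldl pvSlotStep [none, none, none, none]).findSome? pvTruthy

-- ===== PRECONDITION & SPEC =====
-- Pre_ excludes association lists with duplicate keys: they represent no Python dict
-- (A's input is a dict, whose keys are unique), so no input A accepts is excluded.
def Pre_choose_primary_phonetic (phonetics : Option (List (String × List (String × String)))) : Prop :=
  ((phonetics.getD []).map (·.1)).Nodup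

instance (phonetics : Option (List (String × List (String × String)))) : Decidable (Pre_choose_primary_phonetic phonetics) := by unfold Pre_choose_primary_phonetic; infer_instance

def pvWitness_choose_primary_phonetic : (Option (List (String × List (String × String)))) :=
  some [("de", [("ipa", "")]), ("uk", [("ipa", "ju keI")])]

def Spec_choose_primary_phonetic (phonetics : Option (List (String × List (String × String)))) (out : Option String) : Prop := out = choose_primary_phonetic_alt phonetics
instance (phonetics : Option (List (String × List (String × String)))) (out : Option String) : Decidable (Spec_choose_primary_phonetic phonetics out) := by unfold Spec_choose_primary_phonetic; infer_instance

-- ===== CLAIM (what is proved, stated in full; the proofs are below) =====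
def Claim_equal_choose_primary_phonetic : Prop := ∀ (phonetics : Option (List (String × List (String × String)))), Dom_choose_primary_phonetic phonetics → Pre_choose_primary_phonetic phonetics → Spec_choose_primary_phonetic phonetics (choose_primary_phonetic phonetics)

-- ===== LEMMAS AND PROOFS =====

-- first-some choice, used only in proofs
def pvOr (x y : Option String) : Option String :=
  match x with
  | some s => some s
  | none => y

theorem pvOr_none (y : Option String) : pvOr none y = y := rfl

theorem pvRank_eq (k : String) :
    pvRank k = if k = "us" then 0 else if k = "uk" then 1 else if k = "au" then 2 else 3 := by
  simp only [pvRank, PySem.Dict.getD, PySem.Dict.get?_mk_cons]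
  by_cases h1 : k = "us"
  · simp [h1]
  · by_cases h2 : k = "uk"
    · simp [h2, beq_iff_eq, Ne.symm h1]
    · by_cases h3 : k = "au"
      · simp [h3, beq_iff_eq, Ne.symm h1, Ne.symm h2]
      · simp [beq_iff_eq, Ne.symm h1, Ne.symm h2, Ne.symm h3, h1, h2, h3, PySem.Dict.get?]

-- the value the r-th bucket holds after B's single pass: the first item of rank r with truthy ipa
def pvSlot (r : Nat) (d : List (String × List (String × String))) : Option String :=
  d.findSome? (fun kv => if pvRank kv.1 = r then pvTruthy ((PySem.Dict.mk kv.2).get? "ipa") else none)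

-- B's fold fills each bucket first-wins and independently
theorem foldl_slots (d : List (String × List (String × String))) :
    ∀ a b c e : Option String,
      d.foldl pvSlotStep [a, b, c, e] =
        [pvOr a (pvSlot 0 d), pvOr b (pvSlot 1 d), pvOr c (pvSlot 2 d), pvOr e (pvSlot 3 d)] := by
  induction d with
  | nil => intro a b c e; cases a <;> cases b <;> cases c <;> cases e <;> rfl
  | cons kv t ih =>
    intro a b c e
    rw [List.foldl_cons]
    cases htr : pvTruthy ((PySem.Dict.mk kv.2).get? "ipa") with
    | none =>
      have hstep : pvSlotStep [a, b, c, e] kv = [a, b, c, e] := by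
        simp [pvSlotStep, htr]
      have hs : ∀ r, pvSlot r (kv :: t) = pvSlot r t := by
        intro r; simp [pvSlot, List.findSome?_cons, htr]
      rw [hstep, ih, hs, hs, hs, hs]
    | some s =>
      have hrank := pvRank_eq kv.1
      have hs_miss : ∀ r, pvRank kv.1 ≠ r → pvSlot r (kv :: t) = pvSlot r t := by
        intro r hr; simp [pvSlot, List.findSome?_cons, hr, htr]
      by_cases h1 : kv.1 = "us"
      · have hr0 : pvRank kv.1 = 0 := by rw [hrank]; simp [h1]
        have h0 : pvSlot 0 (kv :: t) = some s := by
          simp [pvSlot, List.findSome?_cons, hr0, htr]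
        have hm1 := hs_miss 1 (by omega)
        have hm2 := hs_miss 2 (by omega)
        have hm3 := hs_miss 3 (by omega)
        cases a with
        | none =>
          have hstep : pvSlotStep [none, b, c, e] kv = [some s, b, c, e] := by
            simp [pvSlotStep, htr, hr0]
          rw [hstep, ih, h0, hm1, hm2, hm3]; rfl
        | some a0 =>
          have hstep : pvSlotStep [some a0, b, c, e] kv = [some a0, b, c, e] := by
            simp [pvSlotStep, htr, hr0]
          rw [hstep, ih, h0, hm1, hm2, hm3]; rfl
      · by_cases h2 : kv.1 = "uk"
        · have hr0 : pvRank kv.1 = 1 := by rw [hrank]; simp [h1, h2]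
          have h0 : pvSlot 1 (kv :: t) = some s := by
            simp [pvSlot, List.findSome?_cons, hr0, htr]
          have hm0 := hs_miss 0 (by omega)
          have hm2 := hs_miss 2 (by omega)
          have hm3 := hs_miss 3 (by omega)
          cases b with
          | none =>
            have hstep : pvSlotStep [a, none, c, e] kv = [a, some s, c, e] := by
              simp [pvSlotStep, htr, hr0]
            rw [hstep, ih, h0, hm0, hm2, hm3]; rfl
          | some b0 =>
            have hstep : pvSlotStep [a, some b0, c, e] kv = [a, some b0, c, e] := by
              simp [pvSlotStep, htr, hr0]
            rw [hstep, ih, h0, hm0, hm2, hm3]; rfl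
        · by_cases h3 : kv.1 = "au"
          · have hr0 : pvRank kv.1 = 2 := by rw [hrank]; simp [h1, h2, h3]
            have h0 : pvSlot 2 (kv :: t) = some s := by
              simp [pvSlot, List.findSome?_cons, hr0, htr]
            have hm0 := hs_miss 0 (by omega)
            have hm1 := hs_miss 1 (by omega)
            have hm3 := hs_miss 3 (by omega)
            cases c with
            | none =>
              have hstep : pvSlotStep [a, b, none, e] kv = [a, b, some s, e] := by
                simp [pvSlotStep, htr, hr0]
              rw [hstep, ih, h0, hm0, hm1, hm3]; rfl
            | some c0 =>
              have hstep : pvSlotStep [a, b, some c0, e] kv = [a, b, some c0, e] := by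
                simp [pvSlotStep, htr, hr0]
              rw [hstep, ih, h0, hm0, hm1, hm3]; rfl
          · have hr0 : pvRank kv.1 = 3 := by rw [hrank]; simp [h1, h2, h3]
            have h0 : pvSlot 3 (kv :: t) = some s := by
              simp [pvSlot, List.findSome?_cons, hr0, htr]
            have hm0 := hs_miss 0 (by omega)
            have hm1 := hs_miss 1 (by omega)
            have hm2 := hs_miss 2 (by omega)
            cases e with
            | none =>
              have hstep : pvSlotStep [a, b, c, none] kv = [a, b, c, some s] := by
                simp [pvSlotStep, htr, hr0]
              rw [hstep, ih, h0, hm0, hm1, hm2]; rfl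
            | some e0 =>
              have hstep : pvSlotStep [a, b, c, some e0] kv = [a, b, c, some e0] := by
                simp [pvSlotStep, htr, hr0]
              rw [hstep, ih, h0, hm0, hm1, hm2]; rfl

-- bucket contents are already truthy
theorem pvTruthy_idem {o : Option String} {s : String} (h : pvTruthy o = some s) :
    pvTruthy (some s) = some s := by
  cases o with
  | none => simp [pvTruthy] at h
  | some t =>
    simp only [pvTruthy] at h
    by_cases ht : t = ""
    · rw [if_pos ht] at h; exact absurd h (by simp)
    · rw [if_neg ht] at h
      obtain rfl : t = s := Option.some.inj h
      simp [pvTruthy, ht]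

theorem pvTruthy_slot (r : Nat) (d : List (String × List (String × String))) :
    pvTruthy (pvSlot r d) = pvSlot r d := by
  cases h : pvSlot r d with
  | none => rfl
  | some s =>
    obtain ⟨kv, _, hkv⟩ := List.exists_of_findSome?_eq_some h
    by_cases hr : pvRank kv.1 = r
    · rw [if_pos hr] at hkv; exact pvTruthy_idem hkv
    · rw [if_neg hr] at hkv; cases hkv

theorem pvSlot_none_of_no_rank (r : Nat) (d : List (String × List (String × String)))
    (h : ∀ kv ∈ d, pvRank kv.1 ≠ r) : pvSlot r d = none := by
  apply List.findSome?_eq_none_iff.mpr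
  intro kv hkv
  rw [if_neg (h kv hkv)]

-- A's dict probe of a preferred locale equals B's bucket for its rank (needs unique keys)
theorem pref_probe_eq_slot (loc : String) (r : Nat) (hl : pvRank loc = r)
    (hinj : ∀ k : String, pvRank k = r → k = loc) :
    ∀ d : List (String × List (String × String)), (d.map (·.1)).Nodup →
      pvTruthy (pvIpaAt d loc) = pvSlot r d := by
  intro d
  induction d with
  | nil => intro _; rfl
  | cons kv t ih =>
    intro hnd
    rw [List.map_cons, List.nodup_cons] at hnd
    obtain ⟨k0, v0⟩ := kv
    by_cases hk : k0 = loc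
    · have hipa : pvIpaAt ((k0, v0) :: t) loc = (PySem.Dict.mk v0).get? "ipa" := by
        simp [pvIpaAt, PySem.Dict.getD, PySem.Dict.get?_mk_cons, hk]
      have hrk : pvRank k0 = r := hk ▸ hl
      rw [hipa]
      cases htr : pvTruthy ((PySem.Dict.mk v0).get? "ipa") with
      | some s => simp [pvSlot, hrk, htr]
      | none =>
        have hskip : pvSlot r ((k0, v0) :: t) = pvSlot r t := by
          simp [pvSlot, hrk, htr]
        rw [hskip, pvSlot_none_of_no_rank]
        intro kv' hkv' hr'
        exact hnd.1 (by
          have hkl : kv'.1 = loc := hinj kv'.1 hr'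
          rw [hk]
          exact hkl ▸ (List.mem_map.mpr ⟨kv', hkv', rfl⟩))
    · have hipa : pvIpaAt ((k0, v0) :: t) loc = pvIpaAt t loc := by
        have hb : (k0 == loc) = false := by simp [hk]
        simp [pvIpaAt, PySem.Dict.getD, PySem.Dict.get?_mk_cons, hb]
      have hrk : pvRank k0 ≠ r := fun h => hk (hinj k0 h)
      have hskip : pvSlot r ((k0, v0) :: t) = pvSlot r t := by
        simp [pvSlot, hrk]
      rw [hipa, hskip, ih hnd.2]

-- when no preferred value was found, A's fallback scan equals B's last bucket
theorem valScan_eq_slot3 :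
    ∀ d : List (String × List (String × String)),
      (∀ kv ∈ d, pvRank kv.1 ≠ 3 → pvTruthy ((PySem.Dict.mk kv.2).get? "ipa") = none) →
      pvValScan d = pvSlot 3 d := by
  intro d
  induction d with
  | nil => intro _; rfl
  | cons kv t ih =>
    intro h
    have htail := fun kv' hkv' => h kv' (List.mem_cons_of_mem kv hkv')
    by_cases hr : pvRank kv.1 = 3
    · rw [show kv = (kv.1, kv.2) from rfl]
      simp only [pvValScan]
      cases htr : pvTruthy ((PySem.Dict.mk kv.2).get? "ipa") with
      | some s => simp [pvSlot, List.findSome?_cons, hr, htr]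
      | none =>
        have : pvSlot 3 (kv :: t) = pvSlot 3 t := by
          simp [pvSlot, List.findSome?_cons, hr, htr]
        rw [this]; exact ih htail
    · have htr : pvTruthy ((PySem.Dict.mk kv.2).get? "ipa") = none :=
        h kv List.mem_cons_self hr
      have h1 : pvValScan (kv :: t) = pvValScan t := by
        rw [show kv = (kv.1, kv.2) from rfl]; simp [pvValScan, htr]
      have h2 : pvSlot 3 (kv :: t) = pvSlot 3 t := by
        simp [pvSlot, List.findSome?_cons, htr]
      rw [h1, h2]; exact ih htail

theorem rank_lt3_cases (k : String) (h : pvRank k ≠ 3) :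
    pvRank k = 0 ∨ pvRank k = 1 ∨ pvRank k = 2 := by
  rw [pvRank_eq] at *
  split_ifs at * <;> simp_all

-- ===== VERDICT (by name: the statement is the Claim_ definition above) =====
theorem choose_primary_phonetic_spec : Claim_equal_choose_primary_phonetic := by
  intro phonetics _hdom hpre
  unfold Spec_choose_primary_phonetic
  match phonetics with
  | none => rfl
  | some d =>
    by_cases hd : d = []
    · simp [choose_primary_phonetic, choose_primary_phonetic_alt, hd]
    · have hnd : (d.map (·.1)).Nodup := hpre
      have h0 : pvTruthy (pvIpaAt d "us") = pvSlot 0 d := by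
        apply pref_probe_eq_slot "us" 0 (by decide) _ d hnd
        intro k hk; rw [pvRank_eq] at hk; split_ifs at hk <;> simp_all
      have h1 : pvTruthy (pvIpaAt d "uk") = pvSlot 1 d := by
        apply pref_probe_eq_slot "uk" 1 (by decide) _ d hnd
        intro k hk; rw [pvRank_eq] at hk; split_ifs at hk <;> simp_all
      have h2 : pvTruthy (pvIpaAt d "au") = pvSlot 2 d := by
        apply pref_probe_eq_slot "au" 2 (by decide) _ d hnd
        intro k hk; rw [pvRank_eq] at hk; split_ifs at hk <;> simp_all
      simp only [choose_primary_phonetic, choose_primary_phonetic_alt, if_neg hd]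
      rw [foldl_slots d none none none none, pvOr_none, pvOr_none, pvOr_none, pvOr_none]
      simp only [List.findSome?_cons, pvTruthy_slot]
      simp only [pvPrefScan, h0, h1, h2]
      cases hs0 : pvSlot 0 d with
      | some s => simp [hs0]
      | none =>
        cases hs1 : pvSlot 1 d with
        | some s => simp [hs1]
        | none =>
          cases hs2 : pvSlot 2 d with
          | some s => simp [hs2]
          | none =>
            have hno : ∀ kv ∈ d, pvRank kv.1 ≠ 3 →
                pvTruthy ((PySem.Dict.mk kv.2).get? "ipa") = none := by
              intro kv hkv hr
              rcases rank_lt3_cases kv.1 hr with h | h | h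
              · have := List.findSome?_eq_none_iff.mp hs0 kv hkv; rwa [if_pos h] at this
              · have := List.findSome?_eq_none_iff.mp hs1 kv hkv; rwa [if_pos h] at this
              · have := List.findSome?_eq_none_iff.mp hs2 kv hkv; rwa [if_pos h] at this
            have := valScan_eq_slot3 d hno
            cases hs3 : pvSlot 3 d <;> simp [this, hs3]
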